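-- pv_equiv track=rewrite | github.com/lalitmee/Coding | Codewars/Python/noFive.py | dont_give_me_five
-- ===== SOURCE A (Python) =====
-- def dont_give_me_five(start,end):
--     arr = []
--     num = start
--     for i in range(start, end + 1):
--         if num % 5 != 0 or num % 2 == 0:
--             arr.append(num)
--         num += 1
--     n = len(arr)
--     return n   # amount of numbers
-- ===== SOURCE B (Python) =====
-- def dont_give_me_five(start, end):
--     # Closed form: size of [start, end] minus the number of odd multiples of 5
--     # (i.e. numbers congruent to 5 mod 10) in that interval.
--     if end < start:
--         return 0
--     total = end - start + 1
--     bad = (end - 5) // 10 - (start - 6) // 10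
--     return total - bad
-- ===== Notes on version B (the rewrite author's own statement) =====
-- stated objective: faster
-- what changed: Replaced the element-by-element loop that builds a list and returns its length with an O(1) closed form: interval size minus the count of numbers congruent to 5 mod 10, computed by floor division.
import Mathlib
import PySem

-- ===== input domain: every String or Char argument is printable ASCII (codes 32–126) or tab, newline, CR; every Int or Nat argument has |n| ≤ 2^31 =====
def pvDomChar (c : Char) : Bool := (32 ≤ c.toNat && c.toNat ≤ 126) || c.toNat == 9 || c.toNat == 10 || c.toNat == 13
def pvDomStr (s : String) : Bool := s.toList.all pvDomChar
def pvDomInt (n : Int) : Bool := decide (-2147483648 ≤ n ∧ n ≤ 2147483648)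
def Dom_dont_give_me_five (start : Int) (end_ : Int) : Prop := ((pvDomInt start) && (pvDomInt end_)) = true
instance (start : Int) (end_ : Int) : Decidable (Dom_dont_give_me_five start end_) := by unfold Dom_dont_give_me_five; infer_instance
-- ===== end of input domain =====

-- B replaces A's O(end-start) filtering loop by an O(1) closed form (interval size minus count of n ≡ 5 mod 10).

-- ===== PORT A =====
-- loop body of A: state is (arr, num); append num if num % 5 != 0 or num % 2 == 0, then num += 1
def dgmfStep (st : Array Int × Int) (_ : Int) : Array Int × Int :=
  let arr := st.1
  let num := st.2
  let arr := if PySem.Int.mod num 5 ≠ 0 ∨ PySem.Int.mod num 2 = 0 then arr.push num else arr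
  (arr, num + 1)

def dont_give_me_five (start : Int) (end_ : Int) : Int :=
  let res := (PySem.List.pyRange start (end_ + 1) 1).foldl dgmfStep (#[], start)
  let n := res.1.size
  (n : Int)

-- ===== PORT B =====
def dont_give_me_five_alt (start : Int) (end_ : Int) : Int :=
  if end_ < start then 0
  else
    let total := end_ - start + 1
    let bad := PySem.Int.floordiv (end_ - 5) 10 - PySem.Int.floordiv (start - 6) 10
    total - bad

-- ===== PRECONDITION & SPEC =====
def Spec_dont_give_me_five (start : Int) (end_ : Int) (out : Int) : Prop := out = dont_give_me_five_alt start end_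
instance (start : Int) (end_ : Int) (out : Int) : Decidable (Spec_dont_give_me_five start end_ out) := by unfold Spec_dont_give_me_five; infer_instance

-- ===== CLAIM (what is proved, stated in full; the proofs are below) =====
def Claim_equal_dont_give_me_five : Prop := ∀ (start : Int) (end_ : Int), Dom_dont_give_me_five start end_ → Spec_dont_give_me_five start end_ (dont_give_me_five start end_)

-- ===== LEMMAS AND PROOFS =====

-- The loop invariant: starting from (arr0, s) and folding over pyRange s (s+n) 1,
-- the resulting list length equals arr0.length plus the closed-form count of good numbers in [s, s+n).
theorem dgmf_loop_len (n : Nat) : ∀ (s : Int) (arr0 : Array Int),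
    ((((PySem.List.pyRange s (s + n) 1).foldl dgmfStep (arr0, s)).1.size : Int))
      = (arr0.size : Int) + ((n : Int) - ((s + n - 6) / 10 - (s - 6) / 10)) := by
  induction n with
  | zero =>
    intro s arr0
    rw [show s + ((0:Nat):Int) = s by push_cast; ring, PySem.List.pyRange_one_eq_nil le_rfl]
    simp
  | succ m ih =>
    intro s arr0
    rw [PySem.List.pyRange_one_cons (by push_cast; omega : s < s + ((m+1 : Nat) : Int))]
    simp only [List.foldl_cons, dgmfStep]
    have harr : (s + ((m+1 : Nat) : Int)) = (s + 1) + (m : Nat) := by push_cast; omega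
    rw [harr]
    rw [ih (s + 1) (if PySem.Int.mod s 5 ≠ 0 ∨ PySem.Int.mod s 2 = 0 then arr0.push s else arr0)]
    have h5 : PySem.Int.mod s 5 = s % 5 := PySem.Int.mod_eq_emod_of_pos (by omega)
    have h2 : PySem.Int.mod s 2 = s % 2 := PySem.Int.mod_eq_emod_of_pos (by omega)
    rw [h5, h2]
    by_cases hgood : s % 5 ≠ 0 ∨ s % 2 = 0
    · simp only [if_pos hgood, Array.size_push]
      push_cast
      omega
    · simp only [if_neg hgood]
      push_cast at hgood ⊢
      omega

-- ===== VERDICT (by name: the statement is the Claim_ definition above) =====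
theorem dont_give_me_five_spec : Claim_equal_dont_give_me_five := by
  intro start end_ _
  unfold Spec_dont_give_me_five dont_give_me_five dont_give_me_five_alt
  by_cases h : end_ < start
  · simp [PySem.List.pyRange_one_eq_nil (by omega : end_ + 1 ≤ start), if_pos h]
  · have hn : end_ + 1 = start + ((end_ + 1 - start).toNat : Int) := by omega
    rw [hn]
    simp only []
    rw [dgmf_loop_len (end_ + 1 - start).toNat start #[]]
    rw [if_neg h]
    have hf1 : PySem.Int.floordiv (end_ - 5) 10 = (end_ - 5) / 10 :=
      PySem.Int.floordiv_eq_ediv_of_pos (by omega)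
    have hf2 : PySem.Int.floordiv (start - 6) 10 = (start - 6) / 10 :=
      PySem.Int.floordiv_eq_ediv_of_pos (by omega)
    rw [hf1, hf2]
    have : (((end_ + 1 - start).toNat : Int)) = end_ + 1 - start := by omega
    rw [this]
    simp only [Array.size_empty]
    push_cast
    ring_nf
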